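-- pv_equiv track=rewrite | github.com/uncbiag/mermaid | experiments/generic_experiment_driver.py | _escape_semicolons
-- ===== SOURCE A (Python) =====
-- def _escape_semicolons(s):
--     s_split = s.split(';')
--     if len(s_split)<2:
--         return s
--     else:
--         ret = s_split[0]
--         for c in s_split[1:]:
--             ret += '\\;' + c
--         return ret
-- ===== SOURCE B (Python) =====
-- def _escape_semicolons(s):
--     ret = ''
--     for c in s:
--         if c == ';':
--             ret += '\\;'
--         else:
--             ret += c
--     return ret
-- ===== Notes on version B (the rewrite author's own statement) =====
-- stated objective: simpler
-- what changed: Replaces the split-on-semicolon-then-refold-with-escaped-separators strategy by a single per-character pass that emits a backslash before each semicolon and copies every other character.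
import Mathlib
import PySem

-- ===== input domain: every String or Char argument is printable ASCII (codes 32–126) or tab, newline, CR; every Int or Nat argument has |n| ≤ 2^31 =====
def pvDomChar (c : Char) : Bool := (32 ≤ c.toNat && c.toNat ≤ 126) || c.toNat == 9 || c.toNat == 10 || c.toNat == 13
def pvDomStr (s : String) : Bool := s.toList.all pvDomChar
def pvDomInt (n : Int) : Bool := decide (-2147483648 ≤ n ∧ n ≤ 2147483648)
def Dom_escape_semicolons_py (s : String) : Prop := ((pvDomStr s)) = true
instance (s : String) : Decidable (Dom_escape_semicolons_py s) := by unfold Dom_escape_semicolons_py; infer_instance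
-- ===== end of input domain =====

-- B replaces A's split-on-';'-and-refold with a single per-character pass (simpler); same O(n) cost.

-- ===== PORT A =====
-- A: s_split = s.split(';'); if len(s_split) < 2: return s; else fold ret += '\;' + c over s_split[1:]
def escape_semicolons_py (s : String) : String :=
  let s_split := PySem.Chars.splitOn s.toList (";".toList)
  if s_split.length < 2 then s
  else String.ofList (s_split.tail.foldl (fun ret c => ret ++ (['\\', ';'] ++ c)) s_split.head!)

-- ===== PORT B =====
-- B: ret = ''; for c in s: ret += '\;' if c == ';' else c
def escape_semicolons_py_alt (s : String) : String :=
  String.ofList (s.toList.foldl (fun ret c => if c = ';' then ret ++ ['\\', ';'] else ret ++ [c]) [])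

-- ===== PRECONDITION & SPEC =====
def Spec_escape_semicolons_py (s : String) (out : String) : Prop := out = escape_semicolons_py_alt s
instance (s : String) (out : String) : Decidable (Spec_escape_semicolons_py s out) := by unfold Spec_escape_semicolons_py; infer_instance

-- ===== CLAIM (what is proved, stated in full; the proofs are below) =====
def Claim_equal_escape_semicolons_py : Prop := ∀ (s : String), Dom_escape_semicolons_py s → Spec_escape_semicolons_py s (escape_semicolons_py s)

-- ===== LEMMAS AND PROOFS =====

-- proof-side model of A's split: pvAux cur l = the pieces of l split at ';', the first piece prefixed by cur
def pvAux : List Char → List Char → List (List Char)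
  | cur, [] => [cur]
  | cur, c :: t => if c = ';' then cur :: pvAux [] t else pvAux (cur ++ [c]) t

-- proof-side model of B's loop result
def pvEsc (l : List Char) : List Char := l.flatMap (fun c => if c = ';' then ['\\', ';'] else [c])

theorem pv_go_eq : ∀ (fuel : Nat) (l cur : List Char) (acc : List (List Char)), l.length ≤ fuel →
    PySem.Chars.splitOn.go [';'] fuel l cur acc = acc.reverse ++ pvAux cur.reverse l := by
  intro fuel
  induction fuel with
  | zero =>
    intro l cur acc h
    have : l = [] := List.eq_nil_of_length_eq_zero (Nat.le_zero.mp h)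
    subst this
    simp [PySem.Chars.splitOn.go, pvAux]
  | succ n ih =>
    intro l cur acc h
    cases l with
    | nil => simp [PySem.Chars.splitOn.go, pvAux]
    | cons c rest =>
      rw [PySem.Chars.splitOn.go]
      by_cases hc : c = ';'
      · subst hc
        rw [if_pos (by simp [List.isPrefixOf])]
        rw [ih _ _ _ (by simpa using Nat.le_of_succ_le_succ h)]
        simp [pvAux]
      · rw [if_neg (by simp [List.isPrefixOf]; exact fun h => hc h.symm)]
        rw [ih _ _ _ (by simpa using Nat.le_of_succ_le_succ h)]
        simp [pvAux, hc]

theorem pv_splitOn_eq (l : List Char) : PySem.Chars.splitOn l [';'] = pvAux [] l := by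
  simpa [PySem.Chars.splitOn] using pv_go_eq (l.length + 1) l [] [] (by omega)

theorem pv_aux_ne : ∀ (l cur : List Char), pvAux cur l ≠ [] := by
  intro l
  induction l with
  | nil => intro cur; simp [pvAux]
  | cons c t ih =>
    intro cur
    simp only [pvAux]
    split
    · simp
    · exact ih _

theorem pv_foldl_init (ps : List (List Char)) : ∀ (a b : List Char),
    ps.foldl (fun r c => r ++ (['\\', ';'] ++ c)) (a ++ b) = a ++ ps.foldl (fun r c => r ++ (['\\', ';'] ++ c)) b := by
  induction ps with
  | nil => intro a b; simp
  | cons p ps ih => intro a b; simp only [List.foldl_cons, List.append_assoc]; rw [ih]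

theorem pv_F_aux : ∀ (l cur : List Char),
    (pvAux cur l).tail.foldl (fun r c => r ++ (['\\', ';'] ++ c)) (pvAux cur l).head! = cur ++ pvEsc l := by
  intro l
  induction l with
  | nil => intro cur; simp [pvAux, pvEsc]
  | cons c t ih =>
    intro cur
    by_cases hc : c = ';'
    · subst hc
      rw [show pvAux cur (';' :: t) = cur :: pvAux [] t from by simp [pvAux]]
      rcases ht : pvAux [] t with _ | ⟨p, ps⟩
      · exact absurd ht (pv_aux_ne t [])
      · have hih := ih []
        rw [ht] at hih
        simp only [List.head!, List.tail_cons] at hih ⊢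
        simp only [List.foldl_cons]
        have h2 := pv_foldl_init ps (cur ++ ['\\', ';']) p
        simp only [List.append_assoc] at h2 hih ⊢
        rw [h2, hih]
        simp [pvEsc]
    · simp only [pvAux, if_neg hc]
      rw [ih (cur ++ [c])]
      simp [pvEsc, hc]

theorem pv_mem_len : ∀ (l cur : List Char), ';' ∈ l → 2 ≤ (pvAux cur l).length := by
  intro l
  induction l with
  | nil => intro cur h; simp at h
  | cons c t ih =>
    intro cur h
    by_cases hc : c = ';'
    · subst hc
      rw [show pvAux cur (';' :: t) = cur :: pvAux [] t from by simp [pvAux]]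
      simp only [List.length_cons]
      have : 0 < (pvAux [] t).length := List.length_pos_iff.mpr (pv_aux_ne t [])
      omega
    · have hm : ';' ∈ t := by
        rcases List.mem_cons.mp h with h1 | h1
        · exact absurd h1.symm hc
        · exact h1
      simpa only [pvAux, if_neg hc] using ih (cur ++ [c]) hm

theorem pv_no_semi_esc : ∀ (l : List Char), ';' ∉ l → pvEsc l = l := by
  intro l
  induction l with
  | nil => intro _; simp [pvEsc]
  | cons c t ih =>
    intro hm
    have hc : ¬ (c = ';') := fun hh => hm (by simp [hh])
    have ht : ';' ∉ t := fun hh => hm (List.mem_cons_of_mem _ hh)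
    simp only [pvEsc, List.flatMap_cons, if_neg hc] at *
    rw [ih ht]
    simp

theorem pv_alt_eq (s : String) : escape_semicolons_py_alt s = String.ofList (pvEsc s.toList) := by
  unfold escape_semicolons_py_alt
  have hf : (fun (ret : List Char) (c : Char) => if c = ';' then ret ++ ['\\', ';'] else ret ++ [c])
      = fun ret c => ret ++ (if c = ';' then ['\\', ';'] else [c]) := by
    funext ret c; split <;> rfl
  rw [hf, PySem.List.foldl_append_eq_flatMap]
  rfl

-- ===== VERDICT (by name: the statement is the Claim_ definition above) =====
theorem escape_semicolons_py_spec : Claim_equal_escape_semicolons_py := by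
  intro s _
  unfold Spec_escape_semicolons_py
  rw [pv_alt_eq]
  unfold escape_semicolons_py
  simp only [show (";".toList) = [';'] from rfl, pv_splitOn_eq]
  split
  · next h =>
    have hm : ';' ∉ s.toList := fun hmem => by
      have := pv_mem_len s.toList [] hmem
      omega
    rw [pv_no_semi_esc _ hm, String.ofList_toList]
  · rw [pv_F_aux s.toList []]
    simp
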